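-- pv_equiv track=rewrite | github.com/mwisnowski/mtg_python_deckbuilder | code/web/services/commander_catalog_loader.py | _dedupe_slug
-- ===== SOURCE A (Python) =====
-- from typing import Dict, Iterable, List, Mapping, Optional, Tuple
--
-- def _dedupe_slug(initial: str, existing: Iterable[str]) -> str:
--     base = initial or "commander"
--     if base not in existing:
--         return base
--     counter = 2
--     while f"{base}-{counter}" in existing:
--         counter += 1
--     return f"{base}-{counter}"
-- ===== SOURCE B (Python) =====
-- def _dedupe_slug(initial: str, existing) -> str:
--     base = initial or "commander"
--     prefix = base + "-"
--     base_taken = False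
--     taken = set()
--     for s in existing:
--         if s == base:
--             base_taken = True
--         elif s.startswith(prefix):
--             suffix = s[len(prefix):]
--             if suffix.isdigit():
--                 taken.add(suffix)
--     if not base_taken:
--         return base
--     counter = 2
--     while str(counter) in taken:
--         counter += 1
--     return f"{base}-{counter}"
-- ===== Notes on version B (the rewrite author's own statement) =====
-- stated objective: alternative
-- what changed: A rescans `existing` once per counter candidate; B makes a single pass over `existing` collecting the digit suffixes of base-prefixed entries into a set (and whether base itself occurs), then finds the first free counter against that suffix set.
import Mathlib
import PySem

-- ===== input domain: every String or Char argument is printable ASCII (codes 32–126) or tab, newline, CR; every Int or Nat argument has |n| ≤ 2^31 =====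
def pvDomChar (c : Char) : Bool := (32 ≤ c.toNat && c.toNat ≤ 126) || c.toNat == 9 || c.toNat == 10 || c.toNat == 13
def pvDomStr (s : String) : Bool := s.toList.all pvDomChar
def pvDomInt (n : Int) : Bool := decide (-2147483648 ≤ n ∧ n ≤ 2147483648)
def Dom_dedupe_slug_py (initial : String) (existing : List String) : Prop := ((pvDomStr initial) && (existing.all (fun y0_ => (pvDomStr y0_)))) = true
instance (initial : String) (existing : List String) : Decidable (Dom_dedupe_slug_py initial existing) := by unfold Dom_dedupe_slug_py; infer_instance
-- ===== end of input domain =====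

-- B replaces A's repeated membership scans of `existing` (one per counter value) by a single
-- pass that collects the digit suffixes of `base`-prefixed entries into a set, then searches
-- the first free counter against that set.

-- ===== PORT A =====
-- f"{base}-{counter}"
def pvCandA (base : String) (counter : Int) : String := base ++ "-" ++ PySem.Int.toStr counter

-- `while f"{base}-{counter}" in existing: counter += 1; return f"{base}-{counter}"`;
-- fuel `existing.length + 1` bounds the iterations: the candidates are pairwise distinct
-- (pv_candA_inj / pv_pigeon below), so the loop always exits before the fuel runs out.
def pvWhileA (base : String) (existing : List String) (counter : Int) : Nat → String
  | 0 => pvCandA base counter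
  | fuel+1 =>
      if pvCandA base counter ∈ existing then pvWhileA base existing (counter + 1) fuel
      else pvCandA base counter

def dedupe_slug_py (initial : String) (existing : List String) : String :=
  let base := if initial = "" then "commander" else initial
  if base ∈ existing then pvWhileA base existing 2 (existing.length + 1)
  else base

-- ===== PORT B =====
-- one pass over `existing`: remember whether `base` occurs, and collect the digit suffixes
-- of the entries that start with `base ++ "-"` into a set
def pvScanB (base pre : String) (st : Bool × PySem.Set String) (s : String) : Bool × PySem.Set String :=
  if s = base then (true, st.2)
  else if PySem.Str.startswith s pre then
    if PySem.Str.strIsdigit (PySem.Str.slice s (some (PySem.Str.len pre)) none) then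
      (st.1, PySem.Set.add st.2 (PySem.Str.slice s (some (PySem.Str.len pre)) none))
    else st
  else st

-- `while str(counter) in taken: counter += 1`; fuel `taken.length + 1` bounds the iterations
def pvWhileB (taken : PySem.Set String) (counter : Int) : Nat → Int
  | 0 => counter
  | fuel+1 =>
      if PySem.Set.contains taken (PySem.Int.toStr counter) then pvWhileB taken (counter + 1) fuel
      else counter

def dedupe_slug_py_alt (initial : String) (existing : List String) : String :=
  let base := if initial = "" then "commander" else initial
  let pre := base ++ "-"
  let st := existing.foldl (pvScanB base pre) (false, PySem.Set.empty)
  if st.1 then base ++ "-" ++ PySem.Int.toStr (pvWhileB st.2 2 (st.2.length + 1))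
  else base

-- ===== PRECONDITION & SPEC =====
def Spec_dedupe_slug_py (initial : String) (existing : List String) (out : String) : Prop := out = dedupe_slug_py_alt initial existing
instance (initial : String) (existing : List String) (out : String) : Decidable (Spec_dedupe_slug_py initial existing out) := by unfold Spec_dedupe_slug_py; infer_instance

-- ===== CLAIM (what is proved, stated in full; the proofs are below) =====
def Claim_equal_dedupe_slug_py : Prop := ∀ (initial : String) (existing : List String), Dom_dedupe_slug_py initial existing → Spec_dedupe_slug_py initial existing (dedupe_slug_py initial existing)

-- ===== LEMMAS AND PROOFS =====

lemma pv_toDigitsCore_eq (n : Nat) (f : Nat) (acc : List Char) (hn : 0 < n) (hf : n < f) :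
    Nat.toDigitsCore 10 f n acc = ((Nat.digits 10 n).map Nat.digitChar).reverse ++ acc := by
  induction n using Nat.strong_induction_on generalizing f acc with
  | _ n ih =>
    cases f with
    | zero => omega
    | succ f =>
      rw [Nat.toDigitsCore]
      rw [Nat.digits_def' (by norm_num : 1 < 10) hn]
      by_cases h10 : n / 10 = 0
      · have : n % 10 = n := by omega
        simp [h10, this]
      · have hndiv : 0 < n / 10 := Nat.pos_of_ne_zero h10
        have hlt : n / 10 < n := Nat.div_lt_self hn (by norm_num)
        simp only [h10, if_false]
        rw [ih (n / 10) hlt _ _ hndiv (by omega)]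
        simp

lemma pv_toChars_pos (n : Int) (hn : 0 < n) :
    PySem.Int.toChars n = ((Nat.digits 10 n.toNat).map Nat.digitChar).reverse := by
  have h1 : ¬ n < 0 := by omega
  have h2 : 0 < n.toNat := by omega
  simp only [PySem.Int.toChars, h1, if_false, Nat.toDigits]
  rw [pv_toDigitsCore_eq n.toNat _ [] h2 (by omega)]
  simp

lemma pv_digitChar_inj {a b : Nat} (ha : a < 10) (hb : b < 10)
    (h : Nat.digitChar a = Nat.digitChar b) : a = b := by
  interval_cases a <;> interval_cases b <;> simp_all [Nat.digitChar]

lemma pv_map_digitChar_inj (l1 l2 : List Nat) (h1 : ∀ d ∈ l1, d < 10) (h2 : ∀ d ∈ l2, d < 10)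
    (h : l1.map Nat.digitChar = l2.map Nat.digitChar) : l1 = l2 := by
  induction l1 generalizing l2 with
  | nil => cases l2 <;> simp_all
  | cons a t ih =>
    cases l2 with
    | nil => simp_all
    | cons b t2 =>
      simp only [List.map_cons, List.cons.injEq] at h
      have := pv_digitChar_inj (h1 a (by simp)) (h2 b (by simp)) h.1
      have := ih t2 (fun d hd => h1 d (by simp [hd])) (fun d hd => h2 d (by simp [hd])) h.2
      simp_all

lemma pv_toChars_inj {a b : Int} (ha : 0 < a) (hb : 0 < b)
    (h : PySem.Int.toChars a = PySem.Int.toChars b) : a = b := by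
  rw [pv_toChars_pos a ha, pv_toChars_pos b hb] at h
  have h2 := List.reverse_injective h
  have hd : Nat.digits 10 a.toNat = Nat.digits 10 b.toNat :=
    pv_map_digitChar_inj _ _ (fun d hd => Nat.digits_lt_base (by norm_num) hd)
      (fun d hd => Nat.digits_lt_base (by norm_num) hd) h2
  have := congrArg (Nat.ofDigits 10) hd
  rw [Nat.ofDigits_digits, Nat.ofDigits_digits] at this
  omega

lemma pv_isdigit_digitChar (d : Nat) (hd : d < 10) : PySem.Chars.isdigit (Nat.digitChar d) = true := by
  interval_cases d <;> decide

lemma pv_isdigit_toStr (n : Int) (hn : 0 < n) :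
    PySem.Chars.strIsdigit (PySem.Int.toChars n) = true := by
  rw [pv_toChars_pos n hn]
  have hne : Nat.digits 10 n.toNat ≠ [] := by
    simp [Nat.digits_ne_nil_iff_ne_zero]; omega
  simp only [PySem.Chars.strIsdigit, Bool.and_eq_true, List.all_eq_true]
  constructor
  · simp [hne]
  · intro c hc
    simp only [List.mem_reverse, List.mem_map] at hc
    obtain ⟨d, hd, rfl⟩ := hc
    exact pv_isdigit_digitChar d (Nat.digits_lt_base (by norm_num) hd)

lemma pv_candA_toList (base : String) (n : Int) :
    (pvCandA base n).toList = base.toList ++ '-' :: PySem.Int.toChars n := by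
  simp [pvCandA, PySem.Int.toStr, String.toList_append]

lemma pv_candA_inj {base : String} {a b : Int} (ha : 0 < a) (hb : 0 < b)
    (h : pvCandA base a = pvCandA base b) : a = b := by
  have h2 := congrArg String.toList h
  rw [pv_candA_toList, pv_candA_toList] at h2
  have h3 := List.append_cancel_left h2
  exact pv_toChars_inj ha hb (by simpa using h3)

lemma pv_candA_ne_base (base : String) (n : Int) : pvCandA base n ≠ base := by
  intro h
  have := congrArg (fun s => s.toList.length) h
  simp [pv_candA_toList] at this

lemma pv_scan_fst (base pre : String) (l : List String) (st : Bool × PySem.Set String) :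
    (l.foldl (pvScanB base pre) st).1 = true ↔ (st.1 = true ∨ base ∈ l) := by
  induction l generalizing st with
  | nil => simp
  | cons s t ih =>
    rw [List.foldl_cons, ih]
    unfold pvScanB
    by_cases h1 : s = base
    · rw [if_pos h1]
      simp only [List.mem_cons]
      constructor
      · rintro (_ | h)
        · exact Or.inr (Or.inl h1.symm)
        · exact Or.inr (Or.inr h)
      · intro _; left; trivial
    · rw [if_neg h1]
      have hbs : ¬ base = s := fun h => h1 h.symm
      by_cases h2 : PySem.Str.startswith s pre = true
      · rw [if_pos h2]
        by_cases h3 : PySem.Str.strIsdigit (PySem.Str.slice s (some (PySem.Str.len pre)) none) = true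
        · rw [if_pos h3]
          simp only [List.mem_cons]
          constructor
          · rintro (h | h)
            · exact Or.inl h
            · exact Or.inr (Or.inr h)
          · rintro (h | (h | h))
            · exact Or.inl h
            · exact absurd h hbs
            · exact Or.inr h
        · rw [if_neg h3]
          simp only [List.mem_cons]
          constructor
          · rintro (h | h)
            · exact Or.inl h
            · exact Or.inr (Or.inr h)
          · rintro (h | (h | h))
            · exact Or.inl h
            · exact absurd h hbs
            · exact Or.inr h
      · rw [if_neg h2]
        simp only [List.mem_cons]
        constructor
        · rintro (h | h)
          · exact Or.inl h
          · exact Or.inr (Or.inr h)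
        · rintro (h | (h | h))
          · exact Or.inl h
          · exact absurd h hbs
          · exact Or.inr h

set_option maxHeartbeats 1600000 in
lemma pv_scan_snd_mem (base pre : String) (l : List String) (st : Bool × PySem.Set String) (x : String) :
    x ∈ (l.foldl (pvScanB base pre) st).2 ↔
      x ∈ st.2 ∨ ∃ s ∈ l, s ≠ base ∧ PySem.Str.startswith s pre = true ∧
        PySem.Str.strIsdigit (PySem.Str.slice s (some (PySem.Str.len pre)) none) = true ∧
        PySem.Str.slice s (some (PySem.Str.len pre)) none = x := by
  induction l generalizing st with
  | nil => simp
  | cons s t ih =>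
    rw [List.foldl_cons, ih]
    unfold pvScanB
    by_cases h1 : s = base
    · rw [if_pos h1]
      simp only [List.mem_cons]
      constructor
      · rintro (h | ⟨s', hs', rest⟩)
        · exact Or.inl h
        · exact Or.inr ⟨s', Or.inr hs', rest⟩
      · rintro (h | ⟨s', hs', hne, rest⟩)
        · exact Or.inl h
        · rcases hs' with rfl | hs'
          · exact absurd h1 hne
          · exact Or.inr ⟨s', hs', hne, rest⟩
    · rw [if_neg h1]
      by_cases h2 : PySem.Str.startswith s pre = true
      · rw [if_pos h2]
        by_cases h3 : PySem.Str.strIsdigit (PySem.Str.slice s (some (PySem.Str.len pre)) none) = true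
        · rw [if_pos h3]
          simp only [List.mem_cons]
          constructor
          · rintro (h | ⟨s', hs', rest⟩)
            · rw [PySem.Set.mem_add] at h
              rcases h with h | h
              · exact Or.inl h
              · exact Or.inr ⟨s, Or.inl rfl, h1, h2, h3, h.symm⟩
            · exact Or.inr ⟨s', Or.inr hs', rest⟩
          · rintro (h | ⟨s', hs', hne, hsw, hdig, hx⟩)
            · exact Or.inl ((PySem.Set.mem_add st.2 _ x).mpr (Or.inl h))
            · rcases hs' with rfl | hs'
              · exact Or.inl ((PySem.Set.mem_add st.2 _ x).mpr (Or.inr hx.symm))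
              · exact Or.inr ⟨s', hs', hne, hsw, hdig, hx⟩
        · rw [if_neg h3]
          simp only [List.mem_cons]
          constructor
          · rintro (h | ⟨s', hs', rest⟩)
            · exact Or.inl h
            · exact Or.inr ⟨s', Or.inr hs', rest⟩
          · rintro (h | ⟨s', hs', hne, hsw, hdig, hx⟩)
            · exact Or.inl h
            · rcases hs' with rfl | hs'
              · exact absurd hdig h3
              · exact Or.inr ⟨s', hs', hne, hsw, hdig, hx⟩
      · rw [if_neg h2]
        simp only [List.mem_cons]
        constructor
        · rintro (h | ⟨s', hs', rest⟩)
          · exact Or.inl h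
          · exact Or.inr ⟨s', Or.inr hs', rest⟩
        · rintro (h | ⟨s', hs', hne, hsw, hdig, hx⟩)
          · exact Or.inl h
          · rcases hs' with rfl | hs'
            · exact absurd hsw h2
            · exact Or.inr ⟨s', hs', hne, hsw, hdig, hx⟩

lemma pv_whileA_spec (base : String) (existing : List String) (counter : Int) (fuel k : Nat)
    (hk : k < fuel) (hfree : pvCandA base (counter + k) ∉ existing)
    (hmin : ∀ j : Nat, j < k → pvCandA base (counter + j) ∈ existing) :
    pvWhileA base existing counter fuel = pvCandA base (counter + k) := by
  induction k generalizing counter fuel with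
  | zero =>
    cases fuel with
    | zero => omega
    | succ f =>
      rw [pvWhileA]
      simp only [Nat.cast_zero, add_zero] at hfree ⊢
      rw [if_neg hfree]
  | succ k ih =>
    cases fuel with
    | zero => omega
    | succ f =>
      rw [pvWhileA]
      have h0 : pvCandA base (counter + (0:Nat)) ∈ existing := hmin 0 (by omega)
      simp only [Nat.cast_zero, add_zero] at h0
      rw [if_pos h0]
      have harith : counter + ((k:Nat)+1:Nat) = (counter + 1) + (k:Nat) := by push_cast; ring
      rw [harith] at hfree
      rw [ih (counter+1) f (by omega) hfree ?_]
      · rw [harith]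
      · intro j hj
        have := hmin (j+1) (by omega)
        have : pvCandA base (counter + ((j:Nat)+1:Nat)) ∈ existing := this
        simpa [add_comm, add_left_comm, add_assoc] using this

lemma pv_mem_of_contains {x : String} {l : List String} (h : PySem.Set.contains l x = true) : x ∈ l := by
  simpa [PySem.Set.contains] using h

lemma pv_contains_of_mem {x : String} {l : List String} (h : x ∈ l) : PySem.Set.contains l x = true := by
  simpa [PySem.Set.contains] using h

lemma pv_whileB_spec (taken : PySem.Set String) (counter : Int) (fuel k : Nat)
    (hk : k < fuel) (hfree : PySem.Int.toStr (counter + k) ∉ taken)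
    (hmin : ∀ j : Nat, j < k → PySem.Int.toStr (counter + j) ∈ taken) :
    pvWhileB taken counter fuel = counter + k := by
  induction k generalizing counter fuel with
  | zero =>
    cases fuel with
    | zero => omega
    | succ f =>
      rw [pvWhileB]
      simp only [Nat.cast_zero, add_zero] at hfree ⊢
      rw [if_neg (fun h => hfree (pv_mem_of_contains h))]
  | succ k ih =>
    cases fuel with
    | zero => omega
    | succ f =>
      rw [pvWhileB]
      have h0 : PySem.Int.toStr (counter + (0:Nat)) ∈ taken := hmin 0 (by omega)
      simp only [Nat.cast_zero, add_zero] at h0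
      rw [if_pos (pv_contains_of_mem h0)]
      have harith : counter + ((k:Nat)+1:Nat) = (counter + 1) + (k:Nat) := by push_cast; ring
      rw [harith] at hfree
      rw [ih (counter+1) f (by omega) hfree ?_]
      · rw [harith]
      · intro j hj
        have : PySem.Int.toStr (counter + ((j:Nat)+1:Nat)) ∈ taken := hmin (j+1) (by omega)
        simpa [add_comm, add_left_comm, add_assoc] using this

lemma pv_pigeon {α : Type} [DecidableEq α] (g : Nat → α)
    (inj : ∀ a b : Nat, g a = g b → a = b) (ys : List α)
    (h : ∀ k : Nat, k ≤ ys.length → g k ∈ ys) : False := by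
  have hnd : ((List.range (ys.length + 1)).map g).Nodup := by
    refine (List.nodup_range).map_on ?_
    intro a _ b _ hab
    exact inj a b hab
  have hsub : ((List.range (ys.length + 1)).map g) ⊆ ys := by
    intro x hx
    rcases List.mem_map.mp hx with ⟨k, hk, rfl⟩
    exact h k (by simpa using Nat.lt_succ_iff.mp (List.mem_range.mp hk))
  have := (hnd.subperm hsub).length_le
  simp at this

lemma pv_toStr_toList (n : Int) : (PySem.Int.toStr n).toList = PySem.Int.toChars n := by
  simp [PySem.Int.toStr]

lemma pv_pre_toList (base : String) : (base ++ "-").toList = base.toList ++ ['-'] := by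
  simp [String.toList_append]

lemma pv_slice_toList (s pre : String) :
    (PySem.Str.slice s (some (PySem.Str.len pre)) none).toList = s.toList.drop pre.toList.length := by
  rw [PySem.Str.slice, String.toList_ofList]
  rw [show PySem.Str.len pre = ((pre.toList.length : Nat) : Int) from rfl]
  rw [PySem.Chars.slice_eq_listSlice]
  rw [PySem.List.slice_from s.toList (by positivity)]
  simp

lemma pv_corr (base : String) (existing : List String) (n : Int) (hn : 0 < n) :
    PySem.Int.toStr n ∈ (existing.foldl (pvScanB base (base ++ "-")) (false, PySem.Set.empty)).2 ↔
      pvCandA base n ∈ existing := by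
  rw [pv_scan_snd_mem]
  have hdrop : (pvCandA base n).toList.drop (base ++ "-").toList.length = PySem.Int.toChars n := by
    rw [pv_candA_toList]
    rw [show (base.toList ++ '-' :: PySem.Int.toChars n) = (base ++ "-").toList ++ PySem.Int.toChars n by
      rw [pv_pre_toList]; simp]
    exact List.drop_left
  constructor
  · rintro (h | ⟨s, hs, hne, hsw, hdig, hx⟩)
    · simp [PySem.Set.empty] at h
    · have hpre : (base ++ "-").toList <+: s.toList := by
        rw [← PySem.Chars.startswith_iff]
        simpa [PySem.Str.startswith] using hsw
      have hsplit : (base ++ "-").toList ++ s.toList.drop (base ++ "-").toList.length = s.toList :=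
        (List.prefix_append_drop hpre).symm
      have hxl := congrArg String.toList hx
      rw [pv_slice_toList, pv_toStr_toList] at hxl
      have : s = pvCandA base n := by
        apply String.toList_inj.mp
        rw [← hsplit, hxl, pv_candA_toList, pv_pre_toList]
        simp
      rw [← this]; exact hs
  · intro hmem
    refine Or.inr ⟨pvCandA base n, hmem, pv_candA_ne_base base n, ?_, ?_, ?_⟩
    · rw [PySem.Str.startswith]
      rw [PySem.Chars.startswith_iff]
      rw [pv_candA_toList, pv_pre_toList]
      simp
    · rw [show PySem.Str.strIsdigit (PySem.Str.slice (pvCandA base n) (some (PySem.Str.len (base ++ "-"))) none)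
            = PySem.Chars.strIsdigit (PySem.Str.slice (pvCandA base n) (some (PySem.Str.len (base ++ "-"))) none).toList from rfl]
      rw [pv_slice_toList, hdrop]
      exact pv_isdigit_toStr n hn
    · apply String.toList_inj.mp
      rw [pv_slice_toList, pv_toStr_toList, hdrop]

lemma pv_toStr_inj {a b : Int} (ha : 0 < a) (hb : 0 < b)
    (h : PySem.Int.toStr a = PySem.Int.toStr b) : a = b := by
  apply pv_toChars_inj ha hb
  have := congrArg String.toList h
  rwa [pv_toStr_toList, pv_toStr_toList] at this

lemma pv_main (initial : String) (existing : List String) :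
    dedupe_slug_py initial existing = dedupe_slug_py_alt initial existing := by
  rw [dedupe_slug_py, dedupe_slug_py_alt]
  set base := if initial = "" then "commander" else initial with hbase
  set st := existing.foldl (pvScanB base (base ++ "-")) (false, PySem.Set.empty) with hst
  by_cases hb : base ∈ existing
  · rw [if_pos hb]
    have hst1 : st.1 = true := (pv_scan_fst base (base ++ "-") existing _).mpr (Or.inr hb)
    rw [if_pos hst1]
    -- there is a free candidate
    have hexE : ∃ k : Nat, pvCandA base (2 + (k:Int)) ∉ existing := by
      by_contra hall
      push_neg at hall
      exact pv_pigeon (fun k => pvCandA base (2 + (k:Int)))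
        (fun a b hab => by
          have := pv_candA_inj (by omega) (by omega) hab
          omega)
        existing (fun k _ => hall k)
    set k0 := Nat.find hexE with hk0
    have hfree : pvCandA base (2 + (k0:Int)) ∉ existing := Nat.find_spec hexE
    have hmin : ∀ j : Nat, j < k0 → pvCandA base (2 + (j:Int)) ∈ existing := by
      intro j hj
      by_contra hnot
      have hle : k0 ≤ j := Nat.find_le hnot
      omega
    -- bound k0 by existing.length
    have hk0le : k0 ≤ existing.length := by
      by_contra hgt
      push_neg at hgt
      exact pv_pigeon (fun k => pvCandA base (2 + (k:Int)))
        (fun a b hab => by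
          have := pv_candA_inj (by omega) (by omega) hab
          omega)
        existing (fun k hk => hmin k (by omega))
    -- bound k0 by st.2.length
    have hk0le' : k0 ≤ st.2.length := by
      by_contra hgt
      push_neg at hgt
      exact pv_pigeon (fun k => PySem.Int.toStr (2 + (k:Int)))
        (fun a b hab => by
          have := pv_toStr_inj (a := 2 + (a:Int)) (b := 2 + (b:Int)) (by omega) (by omega) hab
          omega)
        st.2 (fun k hk => (pv_corr base existing (2 + (k:Int)) (by omega)).mpr (hmin k (by omega)))
    rw [pv_whileA_spec base existing 2 (existing.length + 1) k0 (by omega) hfree hmin]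
    rw [pv_whileB_spec st.2 2 (st.2.length + 1) k0 (by omega)
      (fun h => hfree ((pv_corr base existing (2 + (k0:Int)) (by omega)).mp h))
      (fun j hj => (pv_corr base existing (2 + (j:Int)) (by omega)).mpr (hmin j hj))]
    rfl
  · rw [if_neg hb]
    have hst1 : st.1 = false := by
      rcases Bool.eq_false_or_eq_true st.1 with h | h
      · rw [hst] at h
        rcases (pv_scan_fst base (base ++ "-") existing ((false : Bool), (PySem.Set.empty : PySem.Set String))).mp h with h' | h'
        · simp at h'
        · exact absurd h' hb
      · exact h
    rw [hst1]
    simp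

-- ===== VERDICT (by name: the statement is the Claim_ definition above) =====
theorem dedupe_slug_py_spec : Claim_equal_dedupe_slug_py := by
  intro initial existing _
  unfold Spec_dedupe_slug_py
  exact pv_main initial existing
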